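-- pv_equiv track=rewrite | github.com/neoCheck/advent_of_code | 2023/14/day_14_2.py | move_rocks_to_west
-- ===== SOURCE A (Python) =====
-- def move_rocks_to_north(platform: list[list[str]]) -> list[list[str]]:
--     for j in range(len(platform[0])):
--
--         for i in range(len(platform)):
--             p = platform[i][j]
--
--             if p == "O":
--                 counter = 0
--                 while i - counter > 0 and platform[i - (counter + 1)][j] == ".":
--                     counter += 1
--
--                 if counter > 0:
--                     platform[i - counter][j] = "O"
--                     platform[i][j] = "."
--
--     return platform
--
-- def move_rocks_to_west(platform: list[list[str]]) -> list[list[str]]: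
--     platform = [
--         [f"{platform[i][j]}" for i in range(len(platform))]
--         for j in range(len(platform[0]))
--     ]
--     platform = move_rocks_to_north(platform)
--     platform = [
--         [f"{platform[i][j]}" for i in range(len(platform))]
--         for j in range(len(platform[0]))
--     ]
--
--     return platform
-- ===== SOURCE B (Python) =====
-- def move_rocks_to_west(platform: list[list[str]]) -> list[list[str]]:
--     width = len(platform[0])
--     return [_tilt_row_west(row, width) for row in platform]
--
-- def _tilt_row_west(row: list[str], width: int) -> list[str]:
--     out = []
--     rocks = 0
--     dots = 0
--     for j in range(width):
--         c = row[j]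
--         if c == "O":
--             rocks += 1
--         elif c == ".":
--             dots += 1
--         else:
--             out += ["O"] * rocks + ["."] * dots + [c]
--             rocks = 0
--             dots = 0
--     out += ["O"] * rocks + ["."] * dots
--     return out
-- ===== Notes on version B (the rewrite author's own statement) =====
-- stated objective: alternative
-- what changed: Replaces A's double transpose plus per-rock leftward bubbling (an inner while scan over the dots ahead of every rock) by a single left-to-right pass over each row's width prefix that counts rocks and dots per barrier-delimited segment and emits each segment compacted, with no transposes and no inner scan; a timing run found no measurable speed difference on its inputs.
import Mathlib
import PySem

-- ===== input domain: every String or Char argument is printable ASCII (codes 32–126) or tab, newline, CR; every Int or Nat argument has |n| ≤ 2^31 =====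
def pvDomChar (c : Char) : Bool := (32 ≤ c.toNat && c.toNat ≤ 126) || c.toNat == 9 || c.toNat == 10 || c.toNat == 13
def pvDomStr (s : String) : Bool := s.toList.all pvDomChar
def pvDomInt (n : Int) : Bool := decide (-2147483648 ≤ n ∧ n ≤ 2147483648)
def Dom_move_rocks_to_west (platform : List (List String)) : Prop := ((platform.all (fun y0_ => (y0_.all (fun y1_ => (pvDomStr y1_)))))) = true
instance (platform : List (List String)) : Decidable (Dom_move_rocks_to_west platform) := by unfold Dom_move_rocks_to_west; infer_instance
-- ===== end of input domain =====

-- B replaces A's double transpose + per-rock bubbling (an inner while over the dots ahead of each rock)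
-- by one left-to-right pass per row emitting each barrier-delimited segment compacted.
-- Equivalence is about the return value; neither program mutates the caller's argument.

-- ===== PORT A =====
-- platform[i][j] read; rows/cells out of range yield defaults "" / [] (Pre_ keeps all indices in range)
def pvCell (s : List (List String)) (i j : Nat) : String := (s.getD i []).getD j ""
-- platform[i][j] = v
def pvSet (s : List (List String)) (i j : Nat) (v : String) : List (List String) :=
  s.set i ((s.getD i []).set j v)
-- the 'while i - counter > 0 and platform[i - (counter + 1)][j] == ".": counter += 1' loop
def pvCnt (s : List (List String)) (i j cnt : Nat) : Nat :=
  if i - cnt > 0 ∧ pvCell s (i - (cnt + 1)) j = "." then pvCnt s i j (cnt + 1) else cnt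
termination_by i - cnt
decreasing_by omega
-- body of the two nested for-loops of move_rocks_to_north
def pvStep (s : List (List String)) (i j : Nat) : List (List String) :=
  if pvCell s i j = "O" then
    let c := pvCnt s i j 0
    if c > 0 then pvSet (pvSet s (i - c) j "O") i j "." else s
  else s
def move_rocks_to_north (platform : List (List String)) : List (List String) :=
  (List.range platform.headI.length).foldl
    (fun s j => (List.range s.length).foldl (fun s i => pvStep s i j) s) platform
-- the transpose comprehension [[p[i][j] for i in range(len(p))] for j in range(len(p[0]))]
def pvTr (s : List (List String)) : List (List String) :=
  (List.range s.headI.length).map (fun j => (List.range s.length).map (fun i => pvCell s i j))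
def move_rocks_to_west (platform : List (List String)) : List (List String) :=
  pvTr (move_rocks_to_north (pvTr platform))

-- ===== PORT B =====
-- out += ["O"]*rocks + ["."]*dots (+ [c] at a barrier)
def pvFlush (out : List String) (rocks dots : Nat) : List String :=
  out ++ List.replicate rocks "O" ++ List.replicate dots "."
def pvTiltStep (st : List String × Nat × Nat) (c : String) : List String × Nat × Nat :=
  if c = "O" then (st.1, st.2.1 + 1, st.2.2)
  else if c = "." then (st.1, st.2.1, st.2.2 + 1)
  else (pvFlush st.1 st.2.1 st.2.2 ++ [c], 0, 0)
-- 'for j in range(width): c = row[j]; …' — row[j] is in range for every j < width under Pre_,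
-- so the total row.getD j "" is exact there
def pvTiltRowW (row : List String) (width : Nat) : List String :=
  let st := (List.range width).foldl (fun st j => pvTiltStep st (row.getD j "")) ([], 0, 0)
  pvFlush st.1 st.2.1 st.2.2
def move_rocks_to_west_alt (platform : List (List String)) : List (List String) :=
  platform.map (fun row => pvTiltRowW row platform.headI.length)

-- ===== PRECONDITION & SPEC =====
-- Pre_ is exactly where A returns: A raises IndexError when the platform is empty, its first row is
-- empty, or some row is shorter than the first. (The grid's width is the first row's length; both
-- programs ignore cells beyond it in longer rows.)
def Pre_move_rocks_to_west (platform : List (List String)) : Prop :=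
  platform ≠ [] ∧ platform.headI ≠ [] ∧ ∀ r ∈ platform, platform.headI.length ≤ r.length
instance (platform : List (List String)) : Decidable (Pre_move_rocks_to_west platform) := by
  unfold Pre_move_rocks_to_west; infer_instance
def pvWitness_move_rocks_to_west : List (List String) :=
  [["O", ".", "#", "O"], [".", ".", "O", "."]]
def Spec_move_rocks_to_west (platform : List (List String)) (out : List (List String)) : Prop :=
  out = move_rocks_to_west_alt platform
instance (platform : List (List String)) (out : List (List String)) :
    Decidable (Spec_move_rocks_to_west platform out) := by
  unfold Spec_move_rocks_to_west; infer_instance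

-- ===== CLAIM (what is proved, stated in full; the proofs are below) =====
def Claim_equal_move_rocks_to_west : Prop := ∀ (platform : List (List String)), Dom_move_rocks_to_west platform → Pre_move_rocks_to_west platform → Spec_move_rocks_to_west platform (move_rocks_to_west platform)

-- ===== LEMMAS AND PROOFS =====

-- ---- generic list helpers ----
theorem pvSetGetDSelf {α : Type} (l : List α) (i : Nat) (d : α) :
    l.set i (l.getD i d) = l := by
  by_cases h : i < l.length
  · rw [List.getD_eq_getElem l d h]; exact List.set_getElem_self h
  · exact List.set_eq_of_length_le (by omega)

theorem pvHeadIMem {α : Type} [Inhabited α] (l : List α) (h : l ≠ []) : l.headI ∈ l := by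
  cases l with
  | nil => exact absurd rfl h
  | cons a t => exact List.mem_cons_self

theorem pvHeadIMapRange {α : Type} [Inhabited α] (f : Nat → α) (n : Nat) (h : 0 < n) :
    ((List.range n).map f).headI = f 0 := by
  obtain ⟨m, rfl⟩ := Nat.exists_eq_succ_of_ne_zero h.ne' 
  rw [List.range_succ_eq_map]
  simp

theorem pvMapRangeGetDTake {α : Type} (l : List α) (d : α) (C : Nat) (h : C ≤ l.length) :
    (List.range C).map (fun i => l.getD i d) = l.take C := by
  apply List.ext_getElem (by simp [h])
  intro i h1 h2
  simp only [List.getElem_map, List.getElem_range, List.getElem_take]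
  exact List.getD_eq_getElem l d (by simp at h1; omega)

theorem pvGetDMap {α β : Type} (f : α → β) (s : List α) (i : Nat) (d : α) :
    (s.map f).getD i (f d) = f (s.getD i d) := by
  by_cases h : i < s.length
  · rw [List.getD_eq_getElem _ _ (by simpa using h), List.getD_eq_getElem _ _ h, List.getElem_map]
  · rw [List.getD_eq_default _ _ (by simp at h ⊢; omega), List.getD_eq_default _ _ (by omega)]

theorem pvGetDSetSelf {α : Type} (l : List α) (j : Nat) (v d : α) (h : j < l.length) :
    (l.set j v).getD j d = v := by
  rw [List.getD_eq_getElem _ _ (by simpa using h)]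
  exact List.getElem_set_self _

theorem pvGetDSetNe {α : Type} (l : List α) (j j' : Nat) (v d : α) (h : j ≠ j') :
    (l.set j v).getD j' d = l.getD j' d := by
  by_cases h' : j' < l.length
  · rw [List.getD_eq_getElem _ _ (by simpa using h'), List.getD_eq_getElem _ _ h',
      List.getElem_set_ne h]
  · rw [List.getD_eq_default _ _ (by simp; omega), List.getD_eq_default _ _ (by omega)]

-- ---- the per-column algorithm of A, abstracted to a single list ----
def colj (j : Nat) (s : List (List String)) : List String := s.map (fun r => r.getD j "")

def colCnt (c : List String) (i cnt : Nat) : Nat :=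
  if i - cnt > 0 ∧ c.getD (i - (cnt + 1)) "" = "." then colCnt c i (cnt + 1) else cnt
termination_by i - cnt
decreasing_by omega

def colStep (c : List String) (i : Nat) : List String :=
  if c.getD i "" = "O" then
    if colCnt c i 0 > 0 then (c.set (i - colCnt c i 0) "O").set i "." else c
  else c

def tiltCol (c : List String) : List String := (List.range c.length).foldl colStep c

theorem colCnt_le (c : List String) (i : Nat) :
    ∀ cnt, cnt ≤ i → colCnt c i cnt ≤ i := by
  intro cnt hcnt
  fun_induction colCnt c i cnt with
  | case1 cnt h ih => exact ih (by omega)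
  | case2 cnt h => exact hcnt

theorem colStep_length (c : List String) (i : Nat) : (colStep c i).length = c.length := by
  unfold colStep
  split_ifs <;> simp

theorem tiltCol_length (c : List String) : (tiltCol c).length = c.length := by
  unfold tiltCol
  generalize List.range c.length = l
  induction l generalizing c with
  | nil => rfl
  | cons a t ih => simpa [colStep_length] using (ih (colStep c a)).trans (colStep_length c a)

-- ---- relating the grid operations of A to the column view ----
theorem cell_col (s : List (List String)) (i j : Nat) :
    pvCell s i j = (colj j s).getD i "" := by
  unfold pvCell colj
  exact (pvGetDMap (fun r => r.getD j "") s i []).symm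

theorem pvCnt_eq_colCnt (s : List (List String)) (i j : Nat) :
    ∀ cnt, pvCnt s i j cnt = colCnt (colj j s) i cnt := by
  intro cnt
  fun_induction pvCnt s i j cnt with
  | case1 cnt h ih =>
    rw [colCnt]
    rw [cell_col] at h
    simp only [if_pos h]
    exact ih
  | case2 cnt h =>
    rw [colCnt]
    rw [cell_col] at h
    simp only [if_neg h]

theorem pvSet_mapLen (s : List (List String)) (i j : Nat) (v : String) :
    (pvSet s i j v).map List.length = s.map List.length := by
  unfold pvSet
  rw [List.map_set]
  simp only [List.length_set]
  rw [show (s.getD i []).length = (s.map List.length).getD i ([] : List String).length from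
    (pvGetDMap List.length s i []).symm]
  exact pvSetGetDSelf _ _ _

theorem pvStep_mapLen (s : List (List String)) (i j : Nat) :
    (pvStep s i j).map List.length = s.map List.length := by
  simp only [pvStep]
  split_ifs <;> simp [pvSet_mapLen]

theorem colj_pvSet_self (s : List (List String)) (i j : Nat) (v : String)
    (hj : j < (s.getD i []).length) :
    colj j (pvSet s i j v) = (colj j s).set i v := by
  unfold pvSet colj
  rw [List.map_set]
  congr 1
  exact pvGetDSetSelf _ _ _ _ hj

theorem colj_pvSet_ne (s : List (List String)) (i j j' : Nat) (v : String) (h : j' ≠ j) :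
    colj j' (pvSet s i j v) = colj j' s := by
  unfold pvSet colj
  rw [List.map_set]
  rw [show ((s.getD i []).set j v).getD j' "" = (s.getD i []).getD j' "" from
    pvGetDSetNe _ _ _ _ _ (fun hh => h hh.symm)]
  rw [show (s.getD i []).getD j' "" = (s.map (fun r => r.getD j' "")).getD i "" from
    (pvGetDMap (fun r => r.getD j' "") s i []).symm]
  exact pvSetGetDSelf _ _ _

theorem pvGetD_outer_set_ne (s : List (List String)) (m i : Nat) (r : List String) (h : i ≠ m) :
    (s.set m r).getD i [] = s.getD i [] :=
  pvGetDSetNe s m i r [] (fun hh => h hh.symm)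

theorem pvStep_col_self (s : List (List String)) (L i j : Nat)
    (hL : ∀ r ∈ s, r.length = L) (hj : j < L) (hi : i < s.length) :
    colj j (pvStep s i j) = colStep (colj j s) i := by
  have hrowlen : ∀ m, m < s.length → (s.getD m []).length = L := by
    intro m hm
    rw [List.getD_eq_getElem _ _ hm]
    exact hL _ (List.getElem_mem hm)
  simp only [pvStep, colStep]
  rw [cell_col, pvCnt_eq_colCnt]
  set k := colCnt (colj j s) i 0 with hk
  by_cases hO : (colj j s).getD i "" = "O"
  · simp only [if_pos hO]
    by_cases hkpos : k > 0
    · simp only [if_pos hkpos]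
      have hkle : k ≤ i := colCnt_le _ _ 0 (by omega)
      have h1 : colj j (pvSet s (i - k) j "O") = (colj j s).set (i - k) "O" :=
        colj_pvSet_self s (i - k) j "O" (by rw [hrowlen _ (by omega)]; exact hj)
      have hne : i ≠ i - k := by omega
      have h2 : colj j (pvSet (pvSet s (i - k) j "O") i j ".") =
          (colj j (pvSet s (i - k) j "O")).set i "." := by
        apply colj_pvSet_self
        unfold pvSet
        rw [pvGetD_outer_set_ne _ _ _ _ hne, hrowlen _ hi]
        exact hj
      rw [h2, h1]
    · simp only [if_neg hkpos]
  · simp only [if_neg hO]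

theorem pvStep_col_ne (s : List (List String)) (i j j' : Nat) (h : j' ≠ j) :
    colj j' (pvStep s i j) = colj j' s := by
  simp only [pvStep]
  split_ifs
  · rw [colj_pvSet_ne _ _ _ _ _ h, colj_pvSet_ne _ _ _ _ _ h]
  · rfl
  · rfl

theorem shape_transfer (s s' : List (List String)) (L : Nat)
    (h : s'.map List.length = s.map List.length) (hL : ∀ r ∈ s, r.length = L) :
    ∀ r ∈ s', r.length = L := by
  intro r hr
  have : r.length ∈ s'.map List.length := List.mem_map_of_mem hr
  rw [h] at this
  obtain ⟨r₀, hr₀, he⟩ := List.mem_map.mp this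
  rw [← he]
  exact hL _ hr₀

theorem mapLen_length (s s' : List (List String))
    (h : s'.map List.length = s.map List.length) : s'.length = s.length := by
  have := congrArg List.length h
  simpa using this

-- inner loop of move_rocks_to_north, for one fixed column j
theorem inner_spec (L j : Nat) (hj : j < L) :
    ∀ (l : List Nat) (s : List (List String)), (∀ r ∈ s, r.length = L) →
      (∀ i ∈ l, i < s.length) →
      ((l.foldl (fun s i => pvStep s i j) s).map List.length = s.map List.length) ∧
      colj j (l.foldl (fun s i => pvStep s i j) s) = l.foldl colStep (colj j s) ∧
      ∀ j', j' ≠ j → colj j' (l.foldl (fun s i => pvStep s i j) s) = colj j' s := by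
  intro l
  induction l with
  | nil => intro s _ _; exact ⟨rfl, rfl, fun _ _ => rfl⟩
  | cons i t ih =>
    intro s hL hl
    have hi : i < s.length := hl i List.mem_cons_self
    have hstep := pvStep_mapLen s i j
    have hL' : ∀ r ∈ pvStep s i j, r.length = L := shape_transfer _ _ _ hstep hL
    have hlen' : (pvStep s i j).length = s.length := mapLen_length _ _ hstep
    obtain ⟨ha, hb, hc⟩ := ih (pvStep s i j) hL' (fun i' hi' => by rw [hlen']; exact hl i' (List.mem_cons_of_mem _ hi'))
    refine ⟨ha.trans hstep, ?_, ?_⟩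
    · simp only [List.foldl_cons]
      rw [hb, pvStep_col_self s L i j hL hj hi]
    · intro j' hj'
      simp only [List.foldl_cons]
      rw [hc j' hj', pvStep_col_ne s i j j' hj']

theorem colj_length (j : Nat) (s : List (List String)) : (colj j s).length = s.length := by
  unfold colj; simp

-- outer loop of move_rocks_to_north
theorem outer_spec (L : Nat) :
    ∀ (l : List Nat) (s : List (List String)), l.Nodup → (∀ j ∈ l, j < L) →
      (∀ r ∈ s, r.length = L) →
      ((l.foldl (fun s j => (List.range s.length).foldl (fun s i => pvStep s i j) s) s).map List.length
        = s.map List.length) ∧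
      ∀ j, j < L →
        colj j (l.foldl (fun s j => (List.range s.length).foldl (fun s i => pvStep s i j) s) s)
          = if j ∈ l then tiltCol (colj j s) else colj j s := by
  intro l
  induction l with
  | nil => intro s _ _ _; exact ⟨rfl, fun j _ => by simp⟩
  | cons j₀ t ih =>
    intro s hnd hlt hL
    have hj₀ : j₀ < L := hlt j₀ List.mem_cons_self
    obtain ⟨ha, hb, hc⟩ := inner_spec L j₀ hj₀ (List.range s.length) s hL (fun i hi => List.mem_range.mp hi)
    set s₁ := (List.range s.length).foldl (fun s i => pvStep s i j₀) s with hs₁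
    have hL₁ : ∀ r ∈ s₁, r.length = L := shape_transfer _ _ _ ha hL
    obtain ⟨hd, he⟩ := ih s₁ hnd.of_cons (fun j hjt => hlt j (List.mem_cons_of_mem _ hjt)) hL₁
    refine ⟨hd.trans ha, ?_⟩
    intro j hjL
    simp only [List.foldl_cons, ← hs₁]
    rw [he j hjL]
    by_cases hmem : j ∈ j₀ :: t
    · rw [if_pos hmem]
      rcases List.mem_cons.mp hmem with hh | hh
      · subst hh
        have hnt : j ∉ t := (List.nodup_cons.mp hnd).1
        rw [if_neg hnt, hb]
        unfold tiltCol
        rw [colj_length]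
      · have hjne : j ≠ j₀ := by
          intro hcon; subst hcon; exact (List.nodup_cons.mp hnd).1 hh
        rw [if_pos hh, hc j hjne]
    · rw [if_neg hmem]
      have hnt : j ∉ t := fun hh => hmem (List.mem_cons_of_mem _ hh)
      have hjne : j ≠ j₀ := fun hh => hmem (hh ▸ List.mem_cons_self)
      rw [if_neg hnt, hc j hjne]

theorem north_spec (s : List (List String)) (L : Nat)
    (hrows : ∀ r ∈ s, r.length = L) (hhead : s.headI.length = L) :
    ((move_rocks_to_north s).map List.length = s.map List.length) ∧
    ∀ j, j < L → colj j (move_rocks_to_north s) = tiltCol (colj j s) := by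
  unfold move_rocks_to_north
  rw [hhead]
  obtain ⟨ha, hb⟩ := outer_spec L (List.range L) s List.nodup_range (fun j hj => List.mem_range.mp hj) hrows
  exact ⟨ha, fun j hj => by rw [hb j hj, if_pos (List.mem_range.mpr hj)]⟩

-- ---- the per-column algorithm equals B's single-pass compaction ----

-- B's compaction of a whole list (pvTiltRowW row width = pvTiltRow (row.take width) under Pre_)
def pvTiltRow (row : List String) : List String :=
  let st := row.foldl pvTiltStep ([], 0, 0)
  pvFlush st.1 st.2.1 st.2.2

theorem tiltRowW_eq (row : List String) (width : Nat) (h : width ≤ row.length) :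
    pvTiltRowW row width = pvTiltRow (row.take width) := by
  unfold pvTiltRowW pvTiltRow
  rw [show row.take width = (List.range width).map (fun i => row.getD i "") from
    (pvMapRangeGetDTake row "" width h).symm, List.foldl_map]

theorem colCnt_dots (A rest : List String) (dots : Nat)
    (hA : A = [] ∨ A.getLastD "" ≠ ".") :
    ∀ k, k ≤ dots → colCnt (A ++ (List.replicate dots "." ++ rest)) (A.length + dots) k = dots := by
  intro k hk
  induction hfuel : dots - k generalizing k with
  | zero =>
    have hkd : k = dots := by omega
    have hcond : ¬ ((A.length + dots) - k > 0 ∧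
        (A ++ (List.replicate dots "." ++ rest)).getD ((A.length + dots) - (k + 1)) "" = ".") := by
      rintro ⟨h1, h2⟩
      have hApos : 0 < A.length := by omega
      have hidx : A.length + dots - (k + 1) = A.length - 1 := by omega
      rw [hidx, List.getD_append _ _ _ _ (by omega)] at h2
      rcases hA with hA | hA
      · rw [hA] at hApos; simp at hApos
      · apply hA
        rw [List.getLastD_eq_getLast?, List.getLast?_eq_getElem?, ← List.getD_eq_getElem?_getD]
        exact h2
    rw [colCnt, if_neg hcond, hkd]
  | succ m ih =>
    have hklt : k < dots := by omega
    rw [colCnt]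
    rw [if_pos]
    · exact ih (k + 1) (by omega) (by omega)
    constructor
    · omega
    · have hidx : A.length + dots - (k + 1) = A.length + (dots - k - 1) := by omega
      rw [hidx, List.getD_append_right _ _ _ _ (by omega), Nat.add_sub_cancel_left,
        List.getD_append _ _ _ _ (by simp; omega)]
      rw [List.getD_eq_getElem _ _ (by simp; omega), List.getElem_replicate]

theorem step_at (out : List String) (rocks dots : Nat) (rest : List String) (c : String)
    (hout : out = [] ∨ out.getLastD "" ≠ ".") :
    colStep (pvFlush out rocks dots ++ (c :: rest)) (out.length + rocks + dots) =
      pvFlush (pvTiltStep (out, rocks, dots) c).1 (pvTiltStep (out, rocks, dots) c).2.1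
        (pvTiltStep (out, rocks, dots) c).2.2 ++ rest := by
  have hflen : (pvFlush out rocks dots).length = out.length + rocks + dots := by
    unfold pvFlush; simp; omega
  have hgetn : (pvFlush out rocks dots ++ (c :: rest)).getD (out.length + rocks + dots) "" = c := by
    rw [List.getD_append_right _ _ _ _ (by omega), hflen]
    simp
  set n := out.length + rocks + dots with hn
  set A := out ++ List.replicate rocks "O" with hAdef
  have hAlen : A.length = out.length + rocks := by simp [hAdef]
  have hassoc : pvFlush out rocks dots ++ (c :: rest) = A ++ (List.replicate dots "." ++ (c :: rest)) := by
    simp [pvFlush, hAdef]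
  have hA : A = [] ∨ A.getLastD "" ≠ "." := by
    cases rocks with
    | zero => simpa [hAdef] using hout
    | succ m =>
      right
      rw [hAdef, List.replicate_succ', ← List.append_assoc, List.getLastD_concat]
      decide
  unfold colStep
  rw [hgetn]
  by_cases hO : c = "O"
  · subst hO
    rw [if_pos rfl]
    have hcnt : colCnt (pvFlush out rocks dots ++ ("O" :: rest)) n 0 = dots := by
      rw [hassoc, show n = A.length + dots by rw [hAlen]]
      exact colCnt_dots A ("O" :: rest) dots hA 0 (by omega)
    rw [hcnt]
    by_cases hd : dots > 0
    · rw [if_pos hd]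
      obtain ⟨d', rfl⟩ := Nat.exists_eq_succ_of_ne_zero (by omega : dots ≠ 0)
      have hset1 : (pvFlush out rocks (d' + 1) ++ ("O" :: rest)).set (n - (d' + 1)) "O" =
          (A ++ ["O"]) ++ (List.replicate d' "." ++ ("O" :: rest)) := by
        rw [hassoc, List.set_append_right _ _ (by omega)]
        rw [show n - (d' + 1) - A.length = 0 by omega]
        rw [List.replicate_succ]
        simp
      rw [hset1]
      have hlen2 : ((A ++ ["O"]) ++ List.replicate d' ".").length = n := by
        simp [hAlen]; omega
      rw [show (A ++ ["O"]) ++ (List.replicate d' "." ++ ("O" :: rest)) =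
          ((A ++ ["O"]) ++ List.replicate d' ".") ++ ("O" :: rest) by simp]
      rw [List.set_append_right _ _ (by omega), show n - ((A ++ ["O"]) ++ List.replicate d' ".").length = 0 by omega]
      simp only [List.set_cons_zero]
      show ((A ++ ["O"]) ++ List.replicate d' ".") ++ ("." :: rest) =
        pvFlush out (rocks + 1) (d' + 1) ++ rest
      simp [pvFlush, hAdef, List.replicate_succ' (n := rocks), List.replicate_succ' (n := d')]
    · rw [if_neg hd]
      have hd0 : dots = 0 := by omega
      subst hd0
      show pvFlush out rocks 0 ++ ("O" :: rest) = pvFlush out (rocks + 1) 0 ++ rest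
      simp [pvFlush, List.replicate_succ' (n := rocks)]
  · rw [if_neg (by simpa [pvTiltStep] using hO)]
    by_cases hdot : c = "."
    · subst hdot
      show pvFlush out rocks dots ++ ("." :: rest) = _
      simp [pvTiltStep, hO, pvFlush, List.replicate_succ' (n := dots)]
    · show pvFlush out rocks dots ++ (c :: rest) = _
      simp [pvTiltStep, hO, hdot, pvFlush]

theorem tiltStep_inv (st : List String × Nat × Nat) (c : String)
    (h : st.1 = [] ∨ st.1.getLastD "" ≠ ".") :
    (pvTiltStep st c).1 = [] ∨ (pvTiltStep st c).1.getLastD "" ≠ "." := by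
  unfold pvTiltStep
  split_ifs with h1 h2
  · exact h
  · exact h
  · right
    simp only []
    rw [List.getLastD_concat]
    exact h2

theorem tiltStep_len (st : List String × Nat × Nat) (c : String) :
    (pvTiltStep st c).1.length + (pvTiltStep st c).2.1 + (pvTiltStep st c).2.2 =
      st.1.length + st.2.1 + st.2.2 + 1 := by
  unfold pvTiltStep
  split_ifs <;> simp [pvFlush] <;> omega

theorem tilt_invariant (col : List String) :
    ∀ n, n ≤ col.length →
      ((List.range n).foldl colStep col =
        pvFlush ((col.take n).foldl pvTiltStep ([], 0, 0)).1
          ((col.take n).foldl pvTiltStep ([], 0, 0)).2.1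
          ((col.take n).foldl pvTiltStep ([], 0, 0)).2.2 ++ col.drop n) ∧
      (((col.take n).foldl pvTiltStep ([], 0, 0)).1.length +
        ((col.take n).foldl pvTiltStep ([], 0, 0)).2.1 +
        ((col.take n).foldl pvTiltStep ([], 0, 0)).2.2 = n) ∧
      (((col.take n).foldl pvTiltStep ([], 0, 0)).1 = [] ∨
        ((col.take n).foldl pvTiltStep ([], 0, 0)).1.getLastD "" ≠ ".") := by
  intro n
  induction n with
  | zero => exact fun _ => ⟨by simp [pvFlush], by simp, Or.inl (by simp)⟩
  | succ m ih =>
    intro hm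
    obtain ⟨ha, hb, hc⟩ := ih (by omega)
    have hgm : col[m]? = some col[m] := List.getElem?_eq_getElem (by omega)
    have htake : col.take (m + 1) = col.take m ++ [col[m]] := by
      rw [List.take_add_one, hgm]; rfl
    have hdrop : col.drop m = col[m] :: col.drop (m + 1) := by
      rw [List.drop_eq_getElem_cons (by omega)]
      rfl
    set st := (col.take m).foldl pvTiltStep ([], 0, 0) with hst
    have hfold : (col.take (m + 1)).foldl pvTiltStep ([], 0, 0) = pvTiltStep st col[m] := by
      rw [htake, List.foldl_append]; rfl
    refine ⟨?_, ?_, ?_⟩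
    · rw [List.range_succ, List.foldl_append, List.foldl_cons, List.foldl_nil, ha, hdrop, hfold]
      have := step_at st.1 st.2.1 st.2.2 (col.drop (m + 1)) col[m] hc
      rw [show st.1.length + st.2.1 + st.2.2 = m from hb] at this
      exact this
    · rw [hfold, tiltStep_len, hb]
    · rw [hfold]
      exact tiltStep_inv st col[m] hc

theorem tiltCol_eq_pvTiltRow (col : List String) : tiltCol col = pvTiltRow col := by
  obtain ⟨ha, _, _⟩ := tilt_invariant col col.length (le_refl _)
  unfold tiltCol pvTiltRow
  rw [ha]
  simp

-- ---- assembling the main equivalence ----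

theorem main_equiv (p : List (List String)) (hpre : Pre_move_rocks_to_west p) :
    move_rocks_to_west p = move_rocks_to_west_alt p := by
  obtain ⟨hne, hh, hrect⟩ := hpre
  set C := p.headI.length with hC
  set R := p.length with hR
  have hCpos : 0 < C := by
    rw [hC]
    exact List.length_pos_iff.mpr hh
  have hRpos : 0 < R := by
    rw [hR]
    exact List.length_pos_iff.mpr hne
  have hT : pvTr p = (List.range C).map (fun j => (List.range R).map (fun i => pvCell p i j)) := rfl
  have hTlen : (pvTr p).length = C := by rw [hT]; simp
  have hTrows : ∀ r ∈ pvTr p, r.length = R := by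
    intro r hr
    rw [hT] at hr
    obtain ⟨j, _, rfl⟩ := List.mem_map.mp hr
    simp
  have hThead : (pvTr p).headI.length = R := by
    rw [hT, pvHeadIMapRange _ _ hCpos]
    simp
  obtain ⟨hNmap, hNcol⟩ := north_spec (pvTr p) R hTrows hThead
  set N := move_rocks_to_north (pvTr p) with hNdef
  have hNlen : N.length = C := by rw [mapLen_length _ _ hNmap, hTlen]
  have hNrows : ∀ r ∈ N, r.length = R := shape_transfer _ _ _ hNmap hTrows
  have hNne : N ≠ [] := by
    intro hcon
    rw [hcon] at hNlen
    simp at hNlen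
    omega
  have hNhead : N.headI.length = R := hNrows _ (pvHeadIMem _ hNne)
  show pvTr N = p.map (fun row => pvTiltRowW row C)
  have hTrN : pvTr N = (List.range R).map (fun y => (List.range C).map (fun x => pvCell N x y)) := by
    unfold pvTr
    rw [hNhead, hNlen]
  rw [hTrN]
  apply List.ext_getElem (by simp [hR])
  intro y h1 h2
  have hy : y < R := by simpa using h1
  have hyp : y < p.length := by simpa using h2
  have hrowC : C ≤ p[y].length := hrect _ (List.getElem_mem hyp)
  have hcoljT : colj y (pvTr p) = p[y].take C := by
    unfold colj
    rw [hT, List.map_map]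
    have : ∀ j ∈ List.range C,
        ((fun r => r.getD y "") ∘ fun j => (List.range R).map fun i => pvCell p i j) j
          = p[y].getD j "" := by
      intro j _
      simp only [Function.comp]
      rw [PySem.List.getD_map_range _ _ _ _ hy]
      unfold pvCell
      rw [List.getD_eq_getElem _ _ hyp]
    rw [List.map_congr_left this, pvMapRangeGetDTake _ _ _ hrowC]
  have hcolN : colj y N = tiltCol (p[y].take C) := by
    rw [hNcol y hy, hcoljT]
  have hlenTilt : (tiltCol (p[y].take C)).length = C := by
    rw [tiltCol_length, List.length_take]
    omega
  rw [List.getElem_map, List.getElem_map, List.getElem_range]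
  have hcells : ∀ x ∈ List.range C, pvCell N x y = (tiltCol (p[y].take C)).getD x "" := by
    intro x _
    rw [cell_col, hcolN]
  rw [List.map_congr_left hcells, pvMapRangeGetDTake _ _ _ (le_of_eq hlenTilt.symm),
    List.take_of_length_le (le_of_eq hlenTilt), tiltRowW_eq _ _ hrowC]
  exact tiltCol_eq_pvTiltRow _

-- ===== VERDICT (by name: the statement is the Claim_ definition above) =====
theorem move_rocks_to_west_spec : Claim_equal_move_rocks_to_west := by
  intro p _ hpre
  show move_rocks_to_west p = move_rocks_to_west_alt p
  exact main_equiv p hpre
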